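-- pv_equiv track=rewrite | github.com/LindsayB610/books-project | scripts/recommend.py | load_anchor_books
-- ===== SOURCE A (Python) =====
-- from typing import List, Dict, Set, Tuple
--
-- def load_anchor_books(books: List[Dict]) -> Dict[str, List[Dict]]:
--     """
--     Load books by anchor_type.
--     Returns dict mapping anchor_type to list of books.
--     """
--     anchors = {
--         'all_time_favorite': [],
--         'recent_hit': [],
--         'recent_miss': [],
--         'dnf': []
--     }
--
--     for book in books:
--         anchor_type = book.get('anchor_type', '').strip()
--         if anchor_type in anchors:
--             anchors[anchor_type].append(book)
--
--     return anchors
-- ===== SOURCE B (Python) =====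
-- def load_anchor_books(books):
--     """
--     Load books by anchor_type.
--     Returns dict mapping anchor_type to list of books.
--     """
--     return {
--         cat: [b for b in books if b.get('anchor_type', '').strip() == cat]
--         for cat in ('all_time_favorite', 'recent_hit', 'recent_miss', 'dnf')
--     }
-- ===== Notes on version B (the rewrite author's own statement) =====
-- stated objective: idiomatic
-- what changed: A makes a single pass over the books dispatching each into a mutable dict of buckets; B builds the result directly as a dict comprehension over the four fixed category names, each bucket a separate filtering scan of the books.
import Mathlib
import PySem

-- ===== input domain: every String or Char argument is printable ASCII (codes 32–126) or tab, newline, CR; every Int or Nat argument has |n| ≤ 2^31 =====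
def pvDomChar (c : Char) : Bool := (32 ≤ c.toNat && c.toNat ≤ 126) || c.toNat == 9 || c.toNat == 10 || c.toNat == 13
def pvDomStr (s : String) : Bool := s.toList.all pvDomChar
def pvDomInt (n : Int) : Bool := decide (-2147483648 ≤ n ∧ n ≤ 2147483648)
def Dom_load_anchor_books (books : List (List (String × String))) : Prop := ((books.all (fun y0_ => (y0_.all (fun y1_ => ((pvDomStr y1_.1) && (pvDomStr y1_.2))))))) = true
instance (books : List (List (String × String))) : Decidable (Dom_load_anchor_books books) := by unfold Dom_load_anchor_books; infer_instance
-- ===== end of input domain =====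

-- B replaces A's single-pass dict dispatch by four independent filter scans, one per fixed category (objective: more idiomatic/alternative, same result).

-- book.get('anchor_type', '').strip()  (shared by both sources verbatim)
def pvKey (b : List (String × String)) : String :=
  PySem.Str.strip ((PySem.Dict.mk b).getD "anchor_type" "")

-- ===== PORT A =====
def load_anchor_books (books : List (List (String × String))) : List (String × List (List (String × String))) :=
  let anchors0 : PySem.Dict String (List (List (String × String))) :=
    PySem.Dict.ofList [("all_time_favorite", []), ("recent_hit", []), ("recent_miss", []), ("dnf", [])]
  let anchors := books.foldl (fun anchors book =>
    let anchor_type := pvKey book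
    if anchors.contains anchor_type then
      -- anchors[anchor_type].append(book): key is present, so modify with default [] is exact
      anchors.modify anchor_type [] (fun l => l ++ [book])
    else anchors) anchors0
  anchors.items

-- ===== PORT B =====
def load_anchor_books_alt (books : List (List (String × String))) : List (String × List (List (String × String))) :=
  ["all_time_favorite", "recent_hit", "recent_miss", "dnf"].map
    (fun cat => (cat, books.filter (fun b => pvKey b == cat)))

-- ===== PRECONDITION & SPEC =====
def Spec_load_anchor_books (books : List (List (String × String))) (out : List (String × List (List (String × String)))) : Prop := out = load_anchor_books_alt books
instance (books : List (List (String × String))) (out : List (String × List (List (String × String)))) : Decidable (Spec_load_anchor_books books out) := by unfold Spec_load_anchor_books; infer_instance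

-- ===== CLAIM (what is proved, stated in full; the proofs are below) =====
def Claim_equal_load_anchor_books : Prop := ∀ (books : List (List (String × String))), Dom_load_anchor_books books → Spec_load_anchor_books books (load_anchor_books books)

-- ===== LEMMAS AND PROOFS =====

-- A's guarded loop = unconditional modify-loop over the books whose key the INITIAL dict contains
theorem pv_fold_guard (l : List (List (String × String)))
    (d : PySem.Dict String (List (List (String × String)))) :
    l.foldl (fun d b => if d.contains (pvKey b) then d.modify (pvKey b) [] (fun l => l ++ [b]) else d) d
      = (l.filter (fun b => d.contains (pvKey b))).foldl
          (fun d b => d.modify (pvKey b) [] (fun l => l ++ [b])) d := by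
  induction l generalizing d with
  | nil => rfl
  | cons b l ih =>
    simp only [List.foldl_cons, List.filter_cons]
    cases h : d.contains (pvKey b) with
    | false => simp [ih d]
    | true =>
      simp only [if_true, List.foldl_cons]
      rw [ih]
      congr 1
      apply List.filter_congr
      intro x _
      rw [PySem.Dict.contains_modify]
      cases hx : pvKey x == pvKey b with
      | false => simp
      | true => simp [eq_of_beq hx, h]

-- a dict with Nodup keys is determined by its keys and getD
theorem pv_items_eq {κ ν : Type} [BEq κ] [LawfulBEq κ] (d : PySem.Dict κ ν) (d0 : ν)
    (h : d.keys.Nodup) : d.items = d.keys.map (fun k => (k, d.getD k d0)) := by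
  have : d.keys.map (fun k => (k, d.getD k d0)) = d.items.map (fun p => (p.1, d.getD p.1 d0)) := by
    simp only [PySem.Dict.keys, List.map_map]; rfl
  rw [this]
  have : ∀ p ∈ d.items, (p.1, d.getD p.1 d0) = p := by
    intro p hp
    have : (p.1, p.2) ∈ d.items := by simpa using hp
    have := PySem.Dict.getD_of_mem_items d this h d0
    simp [this]
  rw [List.map_congr_left this]
  simp

-- ===== VERDICT (by name: the statement is the Claim_ definition above) =====
theorem load_anchor_books_spec : Claim_equal_load_anchor_books := by
  intro books _
  simp only [Spec_load_anchor_books, load_anchor_books, load_anchor_books_alt]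
  set d0 : PySem.Dict String (List (List (String × String))) :=
    PySem.Dict.ofList [("all_time_favorite", []), ("recent_hit", []), ("recent_miss", []), ("dnf", [])]
  have hcats : d0.keys = ["all_time_favorite", "recent_hit", "recent_miss", "dnf"] := by decide
  have hc : ∀ c ∈ d0.keys, d0.getD c ([] : List (List (String × String))) = [] ∧ d0.contains c = true := by decide
  rw [pv_fold_guard]
  set filtered := books.filter (fun b => d0.contains (pvKey b)) with hfil
  set F := filtered.foldl (fun d b => d.modify (pvKey b) [] (fun l => l ++ [b])) d0 with hF
  -- keys are unchanged by the loop
  have hkeys : F.keys = d0.keys := by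
    rw [hF, PySem.Dict.keys_foldl_modify_key filtered pvKey [] (fun _ b => fun l => l ++ [b]) d0,
        PySem.Set.update_eq_append_filter]
    have hnil : (PySem.Set.ofList (filtered.map pvKey)).filter
        (fun y => !PySem.Set.contains d0.keys y) = [] := by
      rw [List.filter_eq_nil_iff]
      intro y hy
      rw [PySem.Set.mem_ofList] at hy
      obtain ⟨b, hb, rfl⟩ := List.mem_map.mp hy
      have hbc : d0.contains (pvKey b) = true := (List.mem_filter.mp hb).2
      rw [PySem.Dict.contains_eq_decide_mem_keys] at hbc
      simpa using hbc
    rw [hnil, List.append_nil]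
  have hnd : F.keys.Nodup := by rw [hkeys, hcats]; decide
  rw [pv_items_eq F ([] : List (List (String × String))) hnd, hkeys, hcats]
  apply List.map_congr_left
  intro c hcmem
  have hcmem' : c ∈ d0.keys := by rw [hcats]; exact hcmem
  -- compute the bucket for category c
  have hgetD : F.getD c [] = books.filter (fun b => pvKey b == c) := by
    have hm : List.foldl (fun d b => PySem.Dict.modify d (pvKey b) [] (fun l => l ++ [b])) d0 filtered
        = List.foldl (fun d (p : String × List (String × String)) =>
            PySem.Dict.modify d p.1 [] (fun l => l ++ [p.2])) d0
            (filtered.map (fun b => (pvKey b, b))) :=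
      (List.foldl_map (f := fun b => (pvKey b, b))
        (g := fun d (p : String × List (String × String)) =>
          PySem.Dict.modify d p.1 [] (fun l => l ++ [p.2]))
        (l := filtered) (init := d0)).symm
    rw [hF, hm, PySem.Dict.getD_foldl_modify_append, (hc c hcmem').1, List.nil_append,
        List.filter_map, List.map_map]
    rw [show ((fun (x : String × List (String × String)) => x.2) ∘ (fun b => (pvKey b, b))) = id from rfl,
        List.map_id, hfil, List.filter_filter]
    apply List.filter_congr
    intro b _
    simp only [Function.comp_apply]
    cases hbq : pvKey b == c with
    | false => simp only [Bool.false_and]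
    | true =>
      simp only [Bool.true_and]
      rw [eq_of_beq hbq]
      exact (hc c hcmem').2
  rw [hgetD]
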